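-- pv_equiv track=rewrite | github.com/chenmargalit/repo | utils.py | create_cache
-- ===== SOURCE A (Python) =====
-- def create_cache(dict):
--     cache = {}
--     s_keys = set()
--     for key in dict:
--         s_keys.add(key)
--         s_keys.add(key[:-1])
--     for key in s_keys:
--         cache[key] = [k for k in dict if key in k]
--     return cache
-- ===== SOURCE B (Python) =====
-- def create_cache(dict):
--     # Inverted substring index: instead of testing "pattern in key" for every
--     # (pattern, key) pair, enumerate ALL substrings of each key once and look
--     # them up by hash in the pattern set; no substring-containment scan at all.
--     patterns = set()
--     for key in dict:
--         patterns.add(key)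
--         patterns.add(key[:-1])
--     cache = {p: [] for p in patterns}
--     for k in dict:
--         n = len(k)
--         subs = {k[i:j] for i in range(n + 1) for j in range(i, n + 1)}
--         for p in subs & patterns:
--             cache[p].append(k)
--     return cache
-- ===== Notes on version B (the rewrite author's own statement) =====
-- stated objective: faster
-- what changed: B replaces A's per-pattern 'pattern in key' containment scans over the whole dict with an inverted substring index: for each dict key it enumerates all of the key's substrings once and intersects that set with the pattern set by hashing, appending the key to the matching buckets, so the quadratic pattern-by-key scan disappears.
import Mathlib
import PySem

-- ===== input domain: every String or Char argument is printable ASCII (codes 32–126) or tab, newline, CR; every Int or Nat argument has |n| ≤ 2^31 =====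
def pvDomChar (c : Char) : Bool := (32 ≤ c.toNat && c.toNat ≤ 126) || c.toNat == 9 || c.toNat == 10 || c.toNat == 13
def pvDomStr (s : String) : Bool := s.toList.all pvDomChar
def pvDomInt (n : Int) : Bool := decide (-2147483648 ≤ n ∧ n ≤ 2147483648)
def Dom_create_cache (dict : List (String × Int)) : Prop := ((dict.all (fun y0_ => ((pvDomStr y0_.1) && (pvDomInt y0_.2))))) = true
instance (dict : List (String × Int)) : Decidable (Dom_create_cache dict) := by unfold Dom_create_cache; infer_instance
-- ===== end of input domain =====

-- B replaces A's per-pattern 'pattern in key' containment scans with an inverted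
-- substring index: for each dict key it enumerates all substrings of the key once
-- and intersects that set with the pattern set, appending the key to the matching
-- buckets; no per-pattern rescan of the dict occurs (objective: faster; the timing
-- run measured B faster on its large generated inputs).
-- Python set/dict-comprehension iteration order is not modelled: both ports emit
-- cache entries in first-insertion pattern order (outputs compared as dicts).

-- ===== PORT A =====
def create_cache (dict : List (String × Int)) : List (String × List String) :=
  let keys := PySem.List.dedup (dict.map Prod.fst)
  let s_keys : PySem.Set String :=
    keys.foldl (fun s key =>
      PySem.Set.add (PySem.Set.add s key) (PySem.Str.slice key none (some (-1)))) PySem.Set.empty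
  (s_keys.foldl (fun (cache : PySem.Dict String (List String)) key =>
      cache.insert key (keys.filter (fun k => PySem.Str.isIn key k))) ⟨[]⟩).items

-- ===== PORT B =====
def create_cache_alt (dict : List (String × Int)) : List (String × List String) :=
  let keys := PySem.List.dedup (dict.map Prod.fst)
  let patterns : PySem.Set String :=
    keys.foldl (fun s key =>
      PySem.Set.add (PySem.Set.add s key) (PySem.Str.slice key none (some (-1)))) PySem.Set.empty
  let cache0 : PySem.Dict String (List String) :=
    patterns.foldl (fun c p => c.insert p []) ⟨[]⟩
  (keys.foldl (fun cache k =>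
      let subs : PySem.Set String :=
        (PySem.List.pyRange 0 (PySem.Str.len k + 1)).foldl (fun s i =>
          (PySem.List.pyRange i (PySem.Str.len k + 1)).foldl (fun s j =>
            PySem.Set.add s (PySem.Str.slice k (some i) (some j))) s) PySem.Set.empty
      (PySem.Set.inter subs patterns).foldl
        (fun c p => c.modify p [] (fun l => l ++ [k])) cache) cache0).items

-- ===== PRECONDITION & SPEC =====
def Spec_create_cache (dict : List (String × Int)) (out : List (String × List String)) : Prop := out = create_cache_alt dict
instance (dict : List (String × Int)) (out : List (String × List String)) : Decidable (Spec_create_cache dict out) := by unfold Spec_create_cache; infer_instance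

-- ===== CLAIM (what is proved, stated in full; the proofs are below) =====
def Claim_equal_create_cache : Prop := ∀ (dict : List (String × Int)), Dom_create_cache dict → Spec_create_cache dict (create_cache dict)

-- ===== LEMMAS AND PROOFS =====

-- the two set-adds per key preserve Nodup of the accumulating set.
theorem nodup_twoadd_fold (f : String → String) :
    ∀ (keys : List String) (s : PySem.Set String), s.Nodup →
      (keys.foldl (fun s key => PySem.Set.add (PySem.Set.add s key) (f key)) s).Nodup := by
  intro keys
  induction keys with
  | nil => intro s hs; exact hs
  | cons k t ih =>
    intro s hs
    exact ih _ (PySem.Set.nodup_add _ _ (PySem.Set.nodup_add _ _ hs))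

-- Folding insert of pairwise-distinct fresh keys over a dict appends the pairs in order.
theorem foldl_insert_fresh (F : String → List String) :
    ∀ (ps : List String) (acc : PySem.Dict String (List String)),
      ps.Nodup → (∀ p ∈ ps, acc.contains p = false) →
      (ps.foldl (fun c p => c.insert p (F p)) acc).items
        = acc.items ++ ps.map (fun p => (p, F p)) := by
  intro ps
  induction ps with
  | nil => intro acc _ _; simp
  | cons p t ih =>
    intro acc hnd hfresh
    have hc : acc.contains p = false := hfresh p (by simp)
    have hstep : acc.insert p (F p) = ⟨acc.items ++ [(p, F p)]⟩ := by
      rw [PySem.Dict.insert, if_neg (by simp [hc])]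
    simp only [List.foldl_cons, hstep]
    rw [ih ⟨acc.items ++ [(p, F p)]⟩ (List.Nodup.of_cons hnd)]
    · simp
    · intro q hq
      have hqp : ¬ (q = p) := fun h => (List.nodup_cons.mp hnd).1 (h ▸ hq)
      have hq' : acc.contains q = false := hfresh q (by simp [hq])
      simp only [PySem.Dict.contains] at hq' ⊢
      simp only [List.any_append, List.any_cons, List.any_nil, hq', Bool.false_or, Bool.or_false]
      simpa [beq_iff_eq] using fun h : p = q => hqp h.symm

-- find? on a map-shaped dict with distinct keys finds the one matching bucket.
theorem find_map_mem (ps : List String) (g : String → List String) (p : String)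
    (hp : p ∈ ps) (hnd : ps.Nodup) :
    (ps.map (fun q => (q, g q))).find? (fun pr => pr.1 == p) = some (p, g p) := by
  induction ps with
  | nil => cases hp
  | cons a t ih =>
    by_cases hap : a = p
    · subst hap
      simp
    · rw [List.map_cons, List.find?_cons_of_neg (by simpa using hap)]
      exact ih ((List.mem_cons.mp hp).resolve_left (fun h => hap h.symm)) (List.Nodup.of_cons hnd)

-- modify on a map-shaped dict with distinct keys rewrites the one matching bucket.
theorem modify_map (ps : List String) (g : String → List String) (p : String)
    (f : List String → List String) (hp : p ∈ ps) (hnd : ps.Nodup) :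
    PySem.Dict.modify ⟨ps.map (fun q => (q, g q))⟩ p [] f
      = ⟨ps.map (fun q => (q, if q = p then f (g q) else g q))⟩ := by
  have hfind := find_map_mem ps g p hp hnd
  have hcont : (⟨ps.map (fun q => (q, g q))⟩ : PySem.Dict String (List String)).contains p = true := by
    simp only [PySem.Dict.contains, List.any_eq_true]
    exact ⟨(p, g p), List.mem_map.mpr ⟨p, hp, rfl⟩, by simp⟩
  simp only [PySem.Dict.modify, PySem.Dict.getD, PySem.Dict.get?, hfind, Option.map_some,
    Option.getD_some]
  rw [PySem.Dict.insert, if_pos hcont]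
  congr 1
  rw [List.map_map]
  apply List.map_congr_left
  intro q _
  by_cases hqp : q = p
  · subst hqp; simp
  · simp [Function.comp, beq_iff_eq, hqp]

-- folding an unconditional bucket-append over a list H of patterns (the per-key
-- inner loop of B) appends k exactly to the buckets of the members of H.
theorem fold_modify_all (k : String) :
    ∀ (H : List String) (ps : List String) (g : String → List String),
      H.Nodup → (∀ p ∈ H, p ∈ ps) → ps.Nodup →
      H.foldl (fun c p => PySem.Dict.modify c p [] (fun l => l ++ [k]))
        ⟨ps.map (fun q => (q, g q))⟩
        = ⟨ps.map (fun q => (q, if q ∈ H then g q ++ [k] else g q))⟩ := by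
  intro H
  induction H with
  | nil => intro ps g _ _ _; simp
  | cons p t ih =>
    intro ps g hnd hsub hps
    have hpt : p ∉ t := (List.nodup_cons.mp hnd).1
    simp only [List.foldl_cons]
    rw [modify_map ps g p _ (hsub p (by simp)) hps,
      ih ps _ (List.Nodup.of_cons hnd) (fun q hq => hsub q (by simp [hq])) hps]
    congr 1
    apply List.map_congr_left
    intro q _
    by_cases hqp : q = p
    · subst hqp; simp [hpt]
    · simp [hqp, List.mem_cons]

-- membership in a foldl of Set.add over a list of generated elements.
theorem mem_add_fold (q : String) (f : Int → String) :
    ∀ (M : List Int) (s : PySem.Set String),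
      q ∈ M.foldl (fun s j => PySem.Set.add s (f j)) s ↔ q ∈ s ∨ ∃ j ∈ M, q = f j := by
  intro M
  induction M with
  | nil => intro s; simp
  | cons j t ih =>
    intro s
    simp only [List.foldl_cons, ih, PySem.Set.mem_add, List.mem_cons]
    constructor
    · rintro ((h | h) | ⟨j', hj', rfl⟩)
      · exact Or.inl h
      · exact Or.inr ⟨j, Or.inl rfl, h⟩
      · exact Or.inr ⟨j', Or.inr hj', rfl⟩
    · rintro (h | ⟨j', (rfl | hj'), rfl⟩)
      · exact Or.inl (Or.inl h)
      · exact Or.inl (Or.inr rfl)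
      · exact Or.inr ⟨j', hj', rfl⟩

-- a foldl of Set.add preserves Nodup.
theorem nodup_add_fold (f : Int → String) :
    ∀ (M : List Int) (s : PySem.Set String), s.Nodup →
      (M.foldl (fun s j => PySem.Set.add s (f j)) s).Nodup := by
  intro M
  induction M with
  | nil => intro s hs; exact hs
  | cons j t ih => intro s hs; exact ih _ (PySem.Set.nodup_add _ _ hs)

-- membership in B's per-key substring set fold.
theorem mem_subs_fold (k q : String) :
    ∀ (L : List Int) (s : PySem.Set String),
      q ∈ L.foldl (fun s i =>
          (PySem.List.pyRange i (PySem.Str.len k + 1)).foldl (fun s j =>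
            PySem.Set.add s (PySem.Str.slice k (some i) (some j))) s) s
      ↔ q ∈ s ∨ ∃ i ∈ L, ∃ j ∈ PySem.List.pyRange i (PySem.Str.len k + 1),
          q = PySem.Str.slice k (some i) (some j) := by
  intro L
  induction L with
  | nil => intro s; simp
  | cons i t ih =>
    intro s
    simp only [List.foldl_cons, ih, mem_add_fold, List.mem_cons]
    constructor
    · rintro ((h | ⟨j, hj, rfl⟩) | ⟨i', hi', h⟩)
      · exact Or.inl h
      · exact Or.inr ⟨i, Or.inl rfl, j, hj, rfl⟩
      · exact Or.inr ⟨i', Or.inr hi', h⟩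
    · rintro (h | ⟨i', (rfl | hi'), j, hj, rfl⟩)
      · exact Or.inl (Or.inl h)
      · exact Or.inl (Or.inr ⟨j, hj, rfl⟩)
      · exact Or.inr ⟨i', hi', j, hj, rfl⟩

-- B's per-key substring set is Nodup.
theorem nodup_subs_fold (k : String) (L : List Int) :
    (L.foldl (fun s i =>
        (PySem.List.pyRange i (PySem.Str.len k + 1)).foldl (fun s j =>
          PySem.Set.add s (PySem.Str.slice k (some i) (some j))) s)
      PySem.Set.empty).Nodup := by
  suffices h : ∀ (s : PySem.Set String), s.Nodup →
      (L.foldl (fun s i =>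
        (PySem.List.pyRange i (PySem.Str.len k + 1)).foldl (fun s j =>
          PySem.Set.add s (PySem.Str.slice k (some i) (some j))) s) s).Nodup from
    h PySem.Set.empty (by simp [PySem.Set.empty])
  induction L with
  | nil => intro s hs; exact hs
  | cons i t ih => intro s hs; exact ih _ (nodup_add_fold _ _ _ hs)

-- the substring set of k contains exactly the infixes of k.
theorem mem_subs_iff_infix (k q : String) :
    q ∈ ((PySem.List.pyRange 0 (PySem.Str.len k + 1)).foldl (fun s i =>
          (PySem.List.pyRange i (PySem.Str.len k + 1)).foldl (fun s j =>
            PySem.Set.add s (PySem.Str.slice k (some i) (some j))) s) PySem.Set.empty)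
      ↔ q.toList <:+: k.toList := by
  rw [mem_subs_fold]
  have hlen : PySem.Str.len k = (k.toList.length : Int) := by
    simp [PySem.Str.len]
  constructor
  · rintro (h | ⟨i, hi, j, hj, rfl⟩)
    · simp [PySem.Set.empty] at h
    · rw [PySem.List.mem_pyRange_one] at hi hj
      have h0i : 0 ≤ i := hi.1
      have h0j : 0 ≤ j := le_trans h0i hj.1
      have : (PySem.Str.slice k (some i) (some j)).toList
          = (k.toList.drop i.toNat).take (j.toNat - i.toNat) := by
        rw [PySem.Str.toList_slice, PySem.Chars.slice_eq_listSlice,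
          PySem.List.slice_toNat _ h0i h0j]
      rw [← String.toList_inj.mpr rfl] at this ⊢
      rw [this]
      exact ((List.take_prefix _ _).isInfix).trans ((List.drop_suffix _ _).isInfix)
  · rintro ⟨u, v, huv⟩
    refine Or.inr ⟨(u.length : Int), ?_, ((u.length + q.toList.length : Nat) : Int), ?_, ?_⟩
    · rw [PySem.List.mem_pyRange_one, hlen]
      have : u.length + q.toList.length + v.length = k.toList.length := by
        rw [← huv]; simp; omega
      omega
    · rw [PySem.List.mem_pyRange_one, hlen]
      have : u.length + q.toList.length + v.length = k.toList.length := by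
        rw [← huv]; simp; omega
      push_cast
      omega
    · apply String.toList_inj.mp
      rw [PySem.Str.toList_slice, PySem.Chars.slice_eq_listSlice,
        PySem.List.slice_toNat _ (by positivity) (by positivity)]
      have h1 : ((u.length : Int)).toNat = u.length := by omega
      have h2 : (((u.length + q.toList.length : Nat) : Int)).toNat = u.length + q.toList.length := by
        omega
      rw [h1, h2, ← huv, Nat.add_sub_cancel_left]
      rw [List.append_assoc, List.drop_left, List.take_left]

-- the outer loop of B: every dict key appended to the buckets of the patterns it contains.
theorem outer_fold (ps : List String) (hnd : ps.Nodup) :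
    ∀ (keys : List String) (g : String → List String),
      keys.foldl (fun (cache : PySem.Dict String (List String)) k =>
          (PySem.Set.inter
            ((PySem.List.pyRange 0 (PySem.Str.len k + 1)).foldl (fun s i =>
              (PySem.List.pyRange i (PySem.Str.len k + 1)).foldl (fun s j =>
                PySem.Set.add s (PySem.Str.slice k (some i) (some j))) s) PySem.Set.empty)
            ps).foldl
            (fun (c : PySem.Dict String (List String)) p => c.modify p [] (fun l => l ++ [k])) cache)
        ⟨ps.map (fun q => (q, g q))⟩
        = ⟨ps.map (fun q => (q, g q ++ keys.filter (fun k => PySem.Str.isIn q k)))⟩ := by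
  intro keys
  induction keys with
  | nil => intro g; simp
  | cons k t ih =>
    intro g
    simp only [List.foldl_cons]
    set subs := (PySem.List.pyRange 0 (PySem.Str.len k + 1)).foldl (fun s i =>
      (PySem.List.pyRange i (PySem.Str.len k + 1)).foldl (fun s j =>
        PySem.Set.add s (PySem.Str.slice k (some i) (some j))) s) PySem.Set.empty with hsubs
    have hHnd : (PySem.Set.inter subs ps).Nodup :=
      PySem.Set.nodup_inter _ _ (hsubs ▸ nodup_subs_fold k _)
    have hHsub : ∀ p ∈ PySem.Set.inter subs ps, p ∈ ps := by
      intro p hp; exact ((PySem.Set.mem_inter _ _ _).mp hp).2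
    rw [fold_modify_all k _ ps g hHnd hHsub hnd, ih]
    congr 1
    apply List.map_congr_left
    intro q hq
    have hmem : q ∈ PySem.Set.inter subs ps ↔ PySem.Str.isIn q k = true := by
      rw [PySem.Set.mem_inter, hsubs, mem_subs_iff_infix, PySem.Str.isIn_iff_infix]
      exact ⟨fun h => h.1, fun h => ⟨h, hq⟩⟩
    by_cases hin : PySem.Str.isIn q k = true
    · have hin' : PySem.Chars.isIn q.toList k.toList = true := by
        simpa [PySem.Str.isIn] using hin
      simp [hmem.mpr hin, hin']
    · have hnot : q ∉ PySem.Set.inter subs ps := fun h => hin (hmem.mp h)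
      have hin' : ¬ PySem.Chars.isIn q.toList k.toList = true := by
        simpa [PySem.Str.isIn] using hin
      simp [hnot, hin']

-- ===== VERDICT (by name: the statement is the Claim_ definition above) =====
theorem create_cache_spec : Claim_equal_create_cache := by
  intro dict _
  unfold Spec_create_cache create_cache create_cache_alt
  dsimp only
  generalize PySem.List.dedup (dict.map Prod.fst) = keys
  generalize hP : keys.foldl (fun s key =>
      PySem.Set.add (PySem.Set.add s key) (PySem.Str.slice key none (some (-1))))
      PySem.Set.empty = ps
  have hnd : (ps : List String).Nodup := by
    rw [← hP]
    exact nodup_twoadd_fold _ keys PySem.Set.empty (by simp [PySem.Set.empty])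
  rw [foldl_insert_fresh _ ps ⟨[]⟩ hnd (fun p _ => rfl)]
  have hc0 : (ps.foldl (fun (c : PySem.Dict String (List String)) p => c.insert p []) ⟨[]⟩)
      = (⟨ps.map (fun p => (p, ([] : List String)))⟩ : PySem.Dict String (List String)) := by
    have h := foldl_insert_fresh (fun _ => ([] : List String)) ps ⟨[]⟩ hnd (fun p _ => rfl)
    calc (ps.foldl (fun (c : PySem.Dict String (List String)) p => c.insert p []) ⟨[]⟩)
        = ⟨(ps.foldl (fun (c : PySem.Dict String (List String)) p => c.insert p []) ⟨[]⟩).items⟩ := rfl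
      _ = _ := by rw [h]; simp
  rw [hc0, outer_fold ps hnd keys (fun _ => [])]
  simp
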